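-- pv_equiv track=rewrite | github.com/borbregant/UVP_Euler | euler7.py | prastevilo
-- ===== SOURCE A (Python) =====
-- def je_prastevilo(n):
--     if n <= 1:
--         return False
--     for i in range(2, n):
--         if n % i == 0:
--             return False
--     return True
--
-- def prastevilo(n):
--     x=[]
--     j=1
--     while len(x)<n:
--         if (je_prastevilo(j)) == True:
--             x.append(j)
--         j += 2
--     return x[n-2]
-- ===== SOURCE B (Python) =====
-- def prastevilo(n):
--     # Sieve of Eratosthenes with a doubling limit; keep only the first n odd primes.
--     x = []
--     limit = 16
--     while len(x) < n:
--         is_comp = [False] * (limit + 1)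
--         for d in range(2, limit + 1):
--             for m in range(2 * d, limit + 1, d):
--                 is_comp[m] = True
--         x = [i for i in range(3, limit + 1) if not is_comp[i]][:n]
--         limit *= 2
--     return x[n - 2]
-- ===== Notes on version B (the rewrite author's own statement) =====
-- stated objective: faster
-- what changed: A tests each odd candidate by trial division over the whole range(2, j); B instead runs a Sieve of Eratosthenes over [2..limit] with a doubling limit, keeps the first n primes greater than 2, and indexes the same list the same way.
import Mathlib
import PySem

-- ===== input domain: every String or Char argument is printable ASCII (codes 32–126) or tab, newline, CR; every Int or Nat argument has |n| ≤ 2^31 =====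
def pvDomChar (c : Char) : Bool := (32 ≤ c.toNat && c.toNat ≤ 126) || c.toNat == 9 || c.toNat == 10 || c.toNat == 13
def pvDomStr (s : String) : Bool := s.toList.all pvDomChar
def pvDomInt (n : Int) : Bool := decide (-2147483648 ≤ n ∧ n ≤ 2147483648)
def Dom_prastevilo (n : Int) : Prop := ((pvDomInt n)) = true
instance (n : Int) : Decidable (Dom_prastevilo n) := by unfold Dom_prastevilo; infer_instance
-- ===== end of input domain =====

-- B replaces A's per-candidate trial division by a Sieve of Eratosthenes with a doubling
-- limit (keeping the first n primes greater than 2); measured faster. A raises IndexError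
-- for n <= 0 (empty list indexed), excluded by Pre_.


-- ===== PORT A =====
-- je_prastevilo: trial division over range(2, n); the for-loop's early `return False` is `.all`.
def jePrastevilo (n : Int) : Bool :=
  if n ≤ 1 then false
  else (PySem.List.pyRange 2 n 1).all (fun i => !(PySem.Int.mod n i == 0))

-- the `while len(x) < n` loop of A, state (x, j), made total by a fuel argument
-- (the fuel is a termination guard only; `existsFuelA` below shows some fuel reaches the exit).
def loopA (n : Int) : Nat → List Int × Int → List Int × Int
  | 0, s => s
  | f + 1, (x, j) =>
      if PySem.List.len x < n then
        loopA n f ((if jePrastevilo j = true then x ++ [j] else x), j + 2)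
      else (x, j)

-- ---- fuel-existence helpers (cited by the ports; they need the infinitude of primes) ----
-- the odd candidates A has scanned after t iterations, and the primes collected from them
def oddsA (t : Nat) : List Int := (List.range t).map (fun k => (2 * k + 1 : Int))
def collectA (t : Nat) : List Int := (oddsA t).filter jePrastevilo
-- canonical increasing list of the primes p with 3 ≤ p < U (the yardstick both proofs share)
def isOddPrime (i : Int) : Bool := decide (3 ≤ i ∧ Nat.Prime i.toNat)
def canon (U : Int) : List Int := (PySem.List.pyRange 3 U 1).filter isOddPrime

lemma jeP_iff (j : Int) : jePrastevilo j = true ↔ 2 ≤ j ∧ Nat.Prime j.toNat := by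
  unfold jePrastevilo
  by_cases hj : j ≤ 1
  · simp only [hj, if_pos]
    constructor
    · intro h; exact absurd h (by simp)
    · rintro ⟨h2, _⟩; omega
  · rw [if_neg hj, List.all_eq_true]
    have hjn : ((j.toNat : Int)) = j := Int.toNat_of_nonneg (by omega)
    constructor
    · intro h
      refine ⟨by omega, ?_⟩
      rw [Nat.prime_def_lt]
      refine ⟨by omega, ?_⟩
      intro m hm hdvd
      by_contra hm1
      have hm0 : m ≠ 0 := by
        rintro rfl
        have : j.toNat = 0 := Nat.eq_zero_of_zero_dvd hdvd
        omega
      have hmem : (m : Int) ∈ PySem.List.pyRange 2 j 1 := by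
        rw [PySem.List.mem_pyRange_one]
        constructor
        · exact_mod_cast Nat.succ_le_of_lt (by omega)
        · calc (m : Int) < (j.toNat : Int) := by exact_mod_cast hm
            _ = j := hjn
      have hx := h (m : Int) hmem
      simp only [Bool.not_eq_eq_eq_not, Bool.not_true, beq_eq_false_iff_ne, ne_eq] at hx
      apply hx
      rw [PySem.Int.mod_eq_zero_iff_dvd]
      have : (m : Int) ∣ (j.toNat : Int) := Int.natCast_dvd_natCast.mpr hdvd
      rwa [hjn] at this
    · rintro ⟨h2, hp⟩ i hi
      rw [PySem.List.mem_pyRange_one] at hi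
      simp only [Bool.not_eq_eq_eq_not, Bool.not_true, beq_eq_false_iff_ne, ne_eq]
      intro hmod
      rw [PySem.Int.mod_eq_zero_iff_dvd] at hmod
      have hin : ((i.toNat : Int)) = i := Int.toNat_of_nonneg (by omega)
      have hdvd : i.toNat ∣ j.toNat := by
        apply Int.natCast_dvd_natCast.mp
        rw [hin, hjn]; exact hmod
      rcases hp.eq_one_or_self_of_dvd i.toNat hdvd with h1 | h1 <;> omega

lemma collectA_succ (t : Nat) :
    collectA (t + 1) = collectA t ++ (if jePrastevilo (2 * (t : Int) + 1) = true then [(2 * (t : Int) + 1)] else []) := by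
  simp only [collectA, oddsA, List.range_succ]
  cases h : jePrastevilo (2 * (t : Int) + 1) <;> simp [h]

lemma collectA_eq_canon (t : Nat) : collectA t = canon (2 * (t : Int)) := by
  induction t with
  | zero => decide
  | succ t ih =>
    rcases Nat.lt_or_ge t 2 with h | h
    · interval_cases t <;> decide
    · rw [collectA_succ, ih]
      have e : 2 * ((t + 1 : Nat) : Int) = (2 * (t : Int) + 1) + 1 := by push_cast; ring
      rw [e]
      unfold canon
      rw [PySem.List.pyRange_one_succ_right (by omega : (3:Int) ≤ 2 * (t : Int) + 1),
          show (2 * (t : Int) + 1) = (2 * (t : Int)) + 1 from rfl,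
          PySem.List.pyRange_one_succ_right (by omega : (3:Int) ≤ 2 * (t : Int)),
          List.filter_append, List.filter_append]
      have heven : isOddPrime (2 * (t : Int)) = false := by
        simp only [isOddPrime, decide_eq_false_iff_not, not_and]
        intro h3 hp
        have htn : (2 * (t : Int)).toNat = 2 * t := by omega
        rw [htn] at hp
        rcases hp.eq_one_or_self_of_dvd 2 ⟨t, rfl⟩ with h1 | h1 <;> omega
      have hodd : jePrastevilo (2 * (t : Int) + 1) = isOddPrime (2 * (t : Int) + 1) := by
        rw [Bool.eq_iff_iff, jeP_iff]
        simp only [isOddPrime, decide_eq_true_eq]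
        constructor
        · rintro ⟨_, hp⟩; exact ⟨by omega, hp⟩
        · rintro ⟨_, hp⟩; exact ⟨by omega, hp⟩
      rw [List.filter_singleton, List.filter_singleton, heven, hodd]
      cases isOddPrime (2 * (t : Int) + 1) <;> simp

lemma canon_append {U V : Int} (h3 : 3 ≤ U) (hUV : U ≤ V) :
    canon V = canon U ++ (PySem.List.pyRange U V 1).filter isOddPrime := by
  unfold canon
  rw [PySem.List.pyRange_one_append 3 U V h3 hUV, List.filter_append]

lemma canon_prefix {U V : Int} (hUV : U ≤ V) : canon U <+: canon V := by
  by_cases hU : 3 ≤ U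
  · exact ⟨_, (canon_append hU hUV).symm⟩
  · have : canon U = [] := by
      simp [canon, PySem.List.pyRange_one_eq_nil (by omega : U ≤ (3:Int))]
    rw [this]; exact List.nil_prefix

lemma canon_unbounded (m : Nat) : ∃ U : Int, 3 ≤ U ∧ m ≤ (canon U).length := by
  induction m with
  | zero => exact ⟨3, by omega, Nat.zero_le _⟩
  | succ m ih =>
    obtain ⟨U, hU3, hlen⟩ := ih
    obtain ⟨p, hpge, hp⟩ := Nat.exists_infinite_primes (U.toNat + 1)
    have hUp : U ≤ (p : Int) := by omega
    refine ⟨(p : Int) + 1, by omega, ?_⟩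
    rw [canon_append hU3 (by omega : U ≤ (p : Int) + 1), List.length_append]
    have hpmem : (p : Int) ∈ (PySem.List.pyRange U ((p : Int) + 1) 1).filter isOddPrime := by
      rw [List.mem_filter, PySem.List.mem_pyRange_one]
      refine ⟨⟨hUp, by omega⟩, ?_⟩
      simp only [isOddPrime, decide_eq_true_eq, Int.toNat_natCast]
      exact ⟨by exact_mod_cast (by omega : 3 ≤ p), hp⟩
    have : 1 ≤ ((PySem.List.pyRange U ((p : Int) + 1) 1).filter isOddPrime).length :=
      List.length_pos_of_mem hpmem
    omega

lemma existsCollectA (n : Int) : ∃ t : Nat, n ≤ ((collectA t).length : Int) := by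
  rcases (by omega : n ≤ 0 ∨ 0 < n) with hn | hn
  · exact ⟨0, by simp [collectA, oddsA]; omega⟩
  · obtain ⟨U, hU3, hUl⟩ := canon_unbounded n.toNat
    refine ⟨U.toNat, ?_⟩
    rw [collectA_eq_canon]
    have hpre : (canon U).length ≤ (canon (2 * ((U.toNat : Nat) : Int))).length :=
      (canon_prefix (by omega)).length_le
    omega

lemma loopA_step (n : Int) (t : Nat) (h : PySem.List.len (collectA t) < n) (f : Nat) :
    loopA n (f + 1) (collectA t, 1 + 2 * (t : Int)) =
      loopA n f (collectA (t + 1), 1 + 2 * (((t + 1 : Nat)) : Int)) := by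
  have hstate : ((if jePrastevilo (1 + 2 * (t : Int)) = true then collectA t ++ [1 + 2 * (t : Int)] else collectA t),
      (1 + 2 * (t : Int)) + 2) = (collectA (t + 1), 1 + 2 * (((t + 1 : Nat)) : Int)) := by
    have e : (1 + 2 * (t : Int)) = 2 * (t : Int) + 1 := by ring
    rw [Prod.mk.injEq]
    constructor
    · rw [e, collectA_succ t]
      cases jePrastevilo (2 * (t : Int) + 1) <;> simp
    · push_cast; ring
  simp only [loopA]
  rw [if_pos h, hstate]

lemma loopA_progress (n : Int) :
    ∀ (f t : Nat), n ≤ PySem.List.len (loopA n f (collectA t, 1 + 2 * (t : Int))).1 ∨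
      loopA n f (collectA t, 1 + 2 * (t : Int)) = (collectA (t + f), 1 + 2 * ((t + f : Nat) : Int)) := by
  intro f
  induction f with
  | zero => intro t; right; simp [loopA]
  | succ f ih =>
    intro t
    by_cases h : PySem.List.len (collectA t) < n
    · have harith : t + (f + 1) = (t + 1) + f := by omega
      rw [harith, loopA_step n t h f]
      exact ih (t + 1)
    · left
      simp only [loopA]
      rw [if_neg h]
      simp only [PySem.List.len_eq] at h ⊢
      omega

lemma existsFuelA (n : Int) : ∃ f : Nat, n ≤ PySem.List.len (loopA n f ([], 1)).1 := by
  obtain ⟨t, ht⟩ := existsCollectA n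
  have h0 : (([] : List Int), (1 : Int)) = (collectA 0, 1 + 2 * ((0 : Nat) : Int)) := by
    simp [collectA, oddsA]
  refine ⟨t, ?_⟩
  rw [h0]
  rcases loopA_progress n t 0 with hd | he
  · exact hd
  · rw [he]
    simp only [PySem.List.len_eq]
    simpa using ht

def prastevilo (n : Int) : Int :=
  PySem.List.pyGetD (loopA n (Nat.find (existsFuelA n)) ([], 1)).1 (n - 2) 0

-- ===== PORT B =====
-- is_comp, the boolean sieve list of Source B ([False]*(limit+1) is pyRepeat); the two nested
-- `for` loops marking multiples are the two folds.
def sieveList (limit : Int) : List Bool :=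
  (PySem.List.pyRange 2 (limit + 1) 1).foldl
    (fun comp d =>
      (PySem.List.pyRange (2 * d) (limit + 1) d).foldl
        (fun comp m => PySem.List.pySetD comp m true) comp)
    (PySem.List.pyRepeat [false] (limit + 1))

-- `[i for i in range(3, limit+1) if not is_comp[i]][:n]`
def primesTake (n limit : Int) : List Int :=
  let isComp := sieveList limit
  PySem.List.slice ((PySem.List.pyRange 3 (limit + 1) 1).filter
    (fun i => !(PySem.List.pyGetD isComp i false))) none (some n)

-- the `while len(x) < n` loop of Source B, state (x, limit), fuel as above (`existsFuelB` below)
def loopB (n : Int) : Nat → List Int × Int → List Int × Int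
  | 0, s => s
  | f + 1, (x, limit) =>
      if PySem.List.len x < n then
        loopB n f (primesTake n limit, limit * 2)
      else (x, limit)

-- ---- fuel-existence helpers for B (sieve correctness is needed to know the loop exits) ----
def stateB (n : Int) : Nat → List Int × Int
  | 0 => ([], 16)
  | t + 1 => (primesTake n (16 * 2 ^ t), 16 * 2 ^ (t + 1))

lemma pyGetD_pySetD_int (xs : List Bool) (m x : Int) (v d : Bool) (hm : 0 ≤ m)
    (hmlen : m < (xs.length : Int)) (hx : 0 ≤ x) :
    PySem.List.pyGetD (PySem.List.pySetD xs m v) x d = if x = m then v else PySem.List.pyGetD xs x d := by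
  have hm' : ((m.toNat : Nat) : Int) = m := by omega
  have hx' : ((x.toNat : Nat) : Int) = x := by omega
  rw [← hm', ← hx', PySem.List.pyGetD_pySetD_natCast xs m.toNat x.toNat v d (by omega)]
  by_cases h : x = m
  · rw [if_pos (by omega : x.toNat = m.toNat), if_pos (by rw [hm', hx']; exact h)]
  · rw [if_neg (by omega : ¬ x.toNat = m.toNat), if_neg (by rw [hm', hx']; exact h)]

lemma length_markList (ms : List Int) : ∀ comp : List Bool,
    (ms.foldl (fun c m => PySem.List.pySetD c m true) comp).length = comp.length := by
  induction ms with
  | nil => intro comp; rfl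
  | cons m ms ih =>
    intro comp
    simp only [List.foldl_cons]
    rw [ih, PySem.List.length_pySetD]

lemma markList_foldl (ms : List Int) (x : Int) (hx : 0 ≤ x) :
    ∀ comp : List Bool, (∀ m ∈ ms, 0 ≤ m ∧ m < (comp.length : Int)) →
      PySem.List.pyGetD (ms.foldl (fun c m => PySem.List.pySetD c m true) comp) x false
        = (PySem.List.pyGetD comp x false || decide (x ∈ ms)) := by
  induction ms with
  | nil => intro comp _; simp
  | cons m ms ih =>
    intro comp hb
    obtain ⟨hm0, hmlen⟩ := hb m List.mem_cons_self
    simp only [List.foldl_cons]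
    rw [ih (PySem.List.pySetD comp m true) (by
      intro m' hm'
      have := hb m' (List.mem_cons_of_mem m hm')
      rwa [PySem.List.length_pySetD])]
    rw [pyGetD_pySetD_int comp m x true false hm0 hmlen hx]
    by_cases hxm : x = m <;> simp [hxm]

lemma sieve_mem (L x : Int) (hL : 0 ≤ L) (hx : 0 ≤ x) :
    PySem.List.pyGetD (sieveList L) x false =
      (PySem.List.pyRange 2 (L + 1) 1).any (fun d => decide (x ∈ PySem.List.pyRange (2 * d) (L + 1) d)) := by
  have gen : ∀ (ds : List Int) (comp : List Bool), comp.length = (L + 1).toNat → (∀ d ∈ ds, 2 ≤ d) →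
      PySem.List.pyGetD (ds.foldl (fun comp d => (PySem.List.pyRange (2 * d) (L + 1) d).foldl
          (fun comp m => PySem.List.pySetD comp m true) comp) comp) x false
        = (PySem.List.pyGetD comp x false ||
            ds.any (fun d => decide (x ∈ PySem.List.pyRange (2 * d) (L + 1) d))) := by
    intro ds
    induction ds with
    | nil => intro comp _ _; simp
    | cons d ds ih =>
      intro comp hlen hds
      have hd2 := hds d List.mem_cons_self
      simp only [List.foldl_cons, List.any_cons]
      rw [ih _ (by rw [length_markList]; exact hlen)
            (fun d' hd' => hds d' (List.mem_cons_of_mem d hd'))]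
      rw [markList_foldl _ x hx comp (by
        intro m hm
        rw [PySem.List.mem_pyRange_iff_of_pos (by omega)] at hm
        constructor
        · omega
        · rw [hlen]; omega)]
      cases PySem.List.pyGetD comp x false <;>
        cases decide (x ∈ PySem.List.pyRange (2 * d) (L + 1) d) <;> simp
  unfold sieveList
  rw [gen _ _ (by rw [PySem.List.pyRepeat_singleton, List.length_replicate])
        (by intro d hd; rw [PySem.List.mem_pyRange_one] at hd; omega)]
  have hrep : PySem.List.pyGetD (PySem.List.pyRepeat [false] (L + 1)) x false = false := by
    rw [PySem.List.pyRepeat_singleton, PySem.List.pyGetD_of_nonneg _ _ hx]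
    simp [List.getD]
  rw [hrep]
  simp

lemma sieve_iff (L x : Int) (hL : 0 ≤ L) (hx : 0 ≤ x) :
    PySem.List.pyGetD (sieveList L) x false = true ↔
      ∃ d : Int, 2 ≤ d ∧ d ∣ x ∧ 2 * d ≤ x ∧ x ≤ L := by
  rw [sieve_mem L x hL hx, List.any_eq_true]
  constructor
  · rintro ⟨d, hd, hmem⟩
    rw [PySem.List.mem_pyRange_one] at hd
    rw [decide_eq_true_eq, PySem.List.mem_pyRange_iff_of_pos (by omega : (0:Int) < d)] at hmem
    obtain ⟨h2d, hxlt, hdvd⟩ := hmem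
    have hdx : d ∣ x := by
      have := dvd_add hdvd (dvd_mul_left d 2)
      simpa using this
    exact ⟨d, hd.1, hdx, h2d, by omega⟩
  · rintro ⟨d, h2, hdvd, h2d, hxL⟩
    refine ⟨d, ?_, ?_⟩
    · rw [PySem.List.mem_pyRange_one]; omega
    · rw [decide_eq_true_eq, PySem.List.mem_pyRange_iff_of_pos (by omega : (0:Int) < d)]
      exact ⟨h2d, by omega, dvd_sub hdvd (dvd_mul_left d 2)⟩

lemma sieve_prime (L x : Int) (h3 : 3 ≤ x) (hxL : x ≤ L) :
    (!PySem.List.pyGetD (sieveList L) x false) = isOddPrime x := by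
  have hxn : ((x.toNat : Int)) = x := Int.toNat_of_nonneg (by omega)
  have key : PySem.List.pyGetD (sieveList L) x false = true ↔ ¬ Nat.Prime x.toNat := by
    rw [sieve_iff L x (by omega) (by omega)]
    constructor
    · rintro ⟨d, h2, hdvd, h2d, hxL'⟩ hp
      have hdn : ((d.toNat : Int)) = d := Int.toNat_of_nonneg (by omega)
      have hdvdn : d.toNat ∣ x.toNat := by
        apply Int.natCast_dvd_natCast.mp
        rw [hdn, hxn]; exact hdvd
      rcases hp.eq_one_or_self_of_dvd d.toNat hdvdn with h1 | h1 <;> omega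
    · intro hnp
      obtain ⟨m, hdvd, hm2, hmlt⟩ := Nat.exists_dvd_of_not_prime2 (by omega) hnp
      obtain ⟨k, hk⟩ := hdvd
      have hk2 : 2 ≤ k := by
        rcases (by omega : k = 0 ∨ k = 1 ∨ 2 ≤ k) with h | h | h
        · subst h; simp at hk; omega
        · subst h; simp at hk; omega
        · exact h
      have h2m : 2 * m ≤ x.toNat := by
        calc 2 * m = m * 2 := by ring
          _ ≤ m * k := Nat.mul_le_mul_left m hk2
          _ = x.toNat := hk.symm
      refine ⟨(m : Int), by exact_mod_cast hm2, ?_, ?_, hxL⟩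
      · have : (m : Int) ∣ (x.toNat : Int) := Int.natCast_dvd_natCast.mpr ⟨k, hk⟩
        rwa [hxn] at this
      · have : ((2 * m : Nat) : Int) ≤ ((x.toNat : Nat) : Int) := by exact_mod_cast h2m
        push_cast at this
        omega
  cases hs : PySem.List.pyGetD (sieveList L) x false
  · have hp : Nat.Prime x.toNat := by
      by_contra hnp
      rw [key.mpr hnp] at hs
      exact absurd hs (by simp)
    simp [isOddPrime, h3, hp]
  · have hnp := key.mp hs
    simp [isOddPrime, hnp]

lemma primesTake_eq (n L : Int) (hn : 0 ≤ n) :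
    primesTake n L = (canon (L + 1)).take n.toNat := by
  unfold primesTake
  simp only []
  rw [PySem.List.slice_to _ hn]
  congr 1
  apply List.filter_congr
  intro i hi
  rw [PySem.List.mem_pyRange_one] at hi
  exact sieve_prime L i (by omega) (by omega)

lemma stateB_snd (n : Int) (t : Nat) : (stateB n t).2 = 16 * 2 ^ t := by
  cases t with
  | zero => norm_num [stateB]
  | succ t => rfl

lemma loopB_step (n : Int) (t : Nat) (h : PySem.List.len (stateB n t).1 < n) (f : Nat) :
    loopB n (f + 1) (stateB n t) = loopB n f (stateB n (t + 1)) := by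
  obtain ⟨xs, L, hL⟩ : ∃ xs L, stateB n t = (xs, L) := ⟨_, _, rfl⟩
  have h2 : L = 16 * 2 ^ t := by rw [← stateB_snd n t, hL]
  rw [hL]
  simp only [loopB]
  rw [if_pos (by rw [hL] at h; exact h)]
  have hnext : (primesTake n L, L * 2) = stateB n (t + 1) := by
    rw [h2]
    simp only [stateB, Prod.mk.injEq]
    exact ⟨trivial, by ring⟩
  rw [hnext]

lemma loopB_progress (n : Int) :
    ∀ (f t : Nat), n ≤ PySem.List.len (loopB n f (stateB n t)).1 ∨
      loopB n f (stateB n t) = stateB n (t + f) := by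
  intro f
  induction f with
  | zero => intro t; right; simp [loopB]
  | succ f ih =>
    intro t
    by_cases h : PySem.List.len (stateB n t).1 < n
    · have harith : t + (f + 1) = (t + 1) + f := by omega
      rw [harith, loopB_step n t h f]
      exact ih (t + 1)
    · left
      simp only [loopB]
      obtain ⟨xs, L, hL2⟩ : ∃ xs L, stateB n t = (xs, L) := ⟨_, _, rfl⟩
      rw [hL2] at h ⊢
      rw [if_neg h]
      simp only [PySem.List.len_eq] at h ⊢
      omega

lemma existsStateB (n : Int) : ∃ t : Nat, n ≤ (((stateB n t).1).length : Int) := by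
  rcases (by omega : n ≤ 0 ∨ 0 < n) with hn | hn
  · exact ⟨0, by simp [stateB]; omega⟩
  · obtain ⟨U, hU3, hUl⟩ := canon_unbounded n.toNat
    set t := U.toNat with ht
    have hpow : (U : Int) ≤ 16 * 2 ^ t + 1 := by
      have h1 : U.toNat < 2 ^ t := Nat.lt_two_pow_self
      have h2 : ((2 ^ t : Nat) : Int) ≤ 16 * 2 ^ t := by
        push_cast
        have : (0:Int) ≤ 2 ^ t := by positivity
        nlinarith
      omega
    refine ⟨t + 1, ?_⟩
    have h1 : (stateB n (t + 1)).1 = (canon (16 * 2 ^ t + 1)).take n.toNat := by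
      simp only [stateB]
      exact primesTake_eq n (16 * 2 ^ t) (by omega)
    rw [h1, List.length_take]
    have hpre : (canon U).length ≤ (canon (16 * 2 ^ t + 1)).length :=
      (canon_prefix hpow).length_le
    omega

lemma existsFuelB (n : Int) : ∃ f : Nat, n ≤ PySem.List.len (loopB n f ([], 16)).1 := by
  obtain ⟨t, ht⟩ := existsStateB n
  have h0 : (([] : List Int), (16 : Int)) = stateB n 0 := rfl
  refine ⟨t, ?_⟩
  rw [h0]
  rcases loopB_progress n t 0 with hd | he
  · exact hd
  · rw [he]
    simp only [PySem.List.len_eq]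
    simpa using ht

def prastevilo_alt (n : Int) : Int :=
  PySem.List.pyGetD (loopB n (Nat.find (existsFuelB n)) ([], 16)).1 (n - 2) 0

-- ===== PRECONDITION & SPEC =====
-- Pre_ excludes exactly n ≤ 0, where A's `x[n-2]` indexes the empty list and raises IndexError.
def Pre_prastevilo (n : Int) : Prop := 1 ≤ n
instance (n : Int) : Decidable (Pre_prastevilo n) := by unfold Pre_prastevilo; infer_instance
def pvWitness_prastevilo : Int := 5

def Spec_prastevilo (n : Int) (out : Int) : Prop := out = prastevilo_alt n
instance (n : Int) (out : Int) : Decidable (Spec_prastevilo n out) := by unfold Spec_prastevilo; infer_instance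

-- ===== CLAIM (what is proved, stated in full; the proofs are below) =====
def Claim_equal_prastevilo : Prop := ∀ (n : Int), Dom_prastevilo n → Pre_prastevilo n → Spec_prastevilo n (prastevilo n)

-- ===== LEMMAS AND PROOFS =====

lemma loopA_run (n : Int) (hT : ∃ t : Nat, n ≤ ((collectA t).length : Int)) :
    ∀ (f t : Nat), t ≤ Nat.find hT →
      loopA n f (collectA t, 1 + 2 * (t : Int)) =
        (collectA (min (t + f) (Nat.find hT)), 1 + 2 * ((min (t + f) (Nat.find hT) : Nat) : Int)) := by
  intro f
  induction f with
  | zero =>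
    intro t ht
    simp [loopA, Nat.min_eq_left ht]
  | succ f ih =>
    intro t ht
    rcases eq_or_lt_of_le ht with heq | hlt
    · have hdone : n ≤ ((collectA t).length : Int) := heq ▸ Nat.find_spec hT
      have hmin : min (t + (f + 1)) (Nat.find hT) = t := by omega
      rw [hmin]
      simp only [loopA]
      rw [if_neg (by simp only [PySem.List.len_eq]; omega)]
    · have hnot := Nat.find_min hT hlt
      have hcond : PySem.List.len (collectA t) < n := by
        simp only [PySem.List.len_eq]; omega
      rw [loopA_step n t hcond f, ih (t + 1) (by omega)]
      have : (t + 1) + f = t + (f + 1) := by omega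
      rw [this]

lemma loopB_run (n : Int) (hT : ∃ t : Nat, n ≤ (((stateB n t).1).length : Int)) :
    ∀ (f t : Nat), t ≤ Nat.find hT →
      loopB n f (stateB n t) = stateB n (min (t + f) (Nat.find hT)) := by
  intro f
  induction f with
  | zero =>
    intro t ht
    simp [loopB, Nat.min_eq_left ht]
  | succ f ih =>
    intro t ht
    rcases eq_or_lt_of_le ht with heq | hlt
    · have hdone : n ≤ (((stateB n t).1).length : Int) := heq ▸ Nat.find_spec hT
      have hmin : min (t + (f + 1)) (Nat.find hT) = t := by omega
      rw [hmin]
      obtain ⟨xs, L, hL⟩ : ∃ xs L, stateB n t = (xs, L) := ⟨_, _, rfl⟩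
      rw [hL]
      simp only [loopB]
      rw [if_neg (by rw [hL] at hdone; simp only [PySem.List.len_eq]; simp at hdone; omega)]
    · have hnot := Nat.find_min hT hlt
      have hcond : PySem.List.len (stateB n t).1 < n := by
        simp only [PySem.List.len_eq]; omega
      rw [loopB_step n t hcond f, ih (t + 1) (by omega)]
      have : (t + 1) + f = t + (f + 1) := by omega
      rw [this]

lemma resultA (n : Int) (hn : 1 ≤ n) :
    ∃ T : Nat, (loopA n (Nat.find (existsFuelA n)) ([], 1)).1 = canon (2 * (T : Int)) ∧
      (canon (2 * (T : Int))).length = n.toNat := by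
  have hT : ∃ t : Nat, n ≤ ((collectA t).length : Int) := existsCollectA n
  refine ⟨Nat.find hT, ?_, ?_⟩
  · have h0 : (([] : List Int), (1 : Int)) = (collectA 0, 1 + 2 * ((0 : Nat) : Int)) := by
      simp [collectA, oddsA]
    have hstart : loopA n (Nat.find (existsFuelA n)) ([], 1) =
        loopA n (Nat.find (existsFuelA n)) (collectA 0, 1 + 2 * ((0 : Nat) : Int)) :=
      congrArg _ h0
    have hrun := loopA_run n hT (Nat.find (existsFuelA n)) 0 (Nat.zero_le _)
    have hdone := Nat.find_spec (existsFuelA n)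
    rw [hstart, hrun] at hdone
    simp only [PySem.List.len_eq, Nat.zero_add] at hdone
    have hmin : min (Nat.find (existsFuelA n)) (Nat.find hT) = Nat.find hT := by
      refine le_antisymm (Nat.min_le_right _ _) ?_
      by_contra hlt
      exact Nat.find_min hT (Nat.not_le.mp hlt) hdone
    rw [hstart, hrun]
    simp only [Nat.zero_add, hmin]
    exact collectA_eq_canon _
  · rw [← collectA_eq_canon]
    have hspec : n ≤ ((collectA (Nat.find hT)).length : Int) := Nat.find_spec hT
    have hT1 : 1 ≤ Nat.find hT := by
      by_contra h0
      have he : Nat.find hT = 0 := by omega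
      rw [he] at hspec
      simp [collectA, oddsA] at hspec
      omega
    have hmin' := Nat.find_min hT (show Nat.find hT - 1 < Nat.find hT by omega)
    have hsucc := collectA_succ (Nat.find hT - 1)
    have hTe : Nat.find hT - 1 + 1 = Nat.find hT := by omega
    rw [hTe] at hsucc
    have hlen : (collectA (Nat.find hT)).length ≤ (collectA (Nat.find hT - 1)).length + 1 := by
      rw [hsucc, List.length_append]
      cases jePrastevilo (2 * ((Nat.find hT - 1 : Nat) : Int) + 1) <;> simp
    push_cast at hspec hmin'
    omega

lemma resultB (n : Int) (hn : 1 ≤ n) :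
    ∃ L : Int, (loopB n (Nat.find (existsFuelB n)) ([], 16)).1 = (canon (L + 1)).take n.toNat ∧
      n.toNat ≤ (canon (L + 1)).length := by
  have hT : ∃ t : Nat, n ≤ (((stateB n t).1).length : Int) := existsStateB n
  have h0 : (([] : List Int), (16 : Int)) = stateB n 0 := rfl
  have hstart : loopB n (Nat.find (existsFuelB n)) ([], 16) =
      loopB n (Nat.find (existsFuelB n)) (stateB n 0) :=
    congrArg _ h0
  have hrun := loopB_run n hT (Nat.find (existsFuelB n)) 0 (Nat.zero_le _)
  have hdone := Nat.find_spec (existsFuelB n)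
  rw [hstart, hrun] at hdone
  simp only [PySem.List.len_eq, Nat.zero_add] at hdone
  have hmin : min (Nat.find (existsFuelB n)) (Nat.find hT) = Nat.find hT := by
    refine le_antisymm (Nat.min_le_right _ _) ?_
    by_contra hlt
    exact Nat.find_min hT (Nat.not_le.mp hlt) hdone
  have hdone2 : n ≤ (((stateB n (Nat.find hT)).1).length : Int) := Nat.find_spec hT
  have hT1 : 1 ≤ Nat.find hT := by
    by_contra h0'
    have he : Nat.find hT = 0 := by omega
    rw [he] at hdone2
    simp [stateB] at hdone2
    omega
  have hTe : Nat.find hT = (Nat.find hT - 1) + 1 := by omega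
  have hstate : (stateB n (Nat.find hT)).1 = (canon (16 * 2 ^ (Nat.find hT - 1) + 1)).take n.toNat := by
    rw [hTe]
    simp only [stateB]
    exact primesTake_eq n (16 * 2 ^ (Nat.find hT - 1)) (by omega)
  refine ⟨16 * 2 ^ (Nat.find hT - 1), ?_, ?_⟩
  · rw [hstart, hrun]
    simp only [Nat.zero_add, hmin]
    exact hstate
  · rw [hstate, List.length_take] at hdone2
    omega

lemma canon_take_eq {U V : Int} (k : Nat) (hU : k ≤ (canon U).length) (hV : k ≤ (canon V).length) :
    (canon U).take k = (canon V).take k := by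
  rcases le_total U V with h | h
  · obtain ⟨r, hr⟩ := canon_prefix h
    rw [← hr, List.take_append_of_le_length hU]
  · obtain ⟨r, hr⟩ := canon_prefix h
    rw [← hr, List.take_append_of_le_length hV]

-- ===== VERDICT (by name: the statement is the Claim_ definition above) =====
theorem prastevilo_spec : Claim_equal_prastevilo := by
  intro n _ hn
  unfold Spec_prastevilo prastevilo prastevilo_alt
  obtain ⟨T, hA, hAlen⟩ := resultA n hn
  obtain ⟨L, hB, hBlen⟩ := resultB n hn
  rw [hA, hB]
  have h1 : (canon (2 * (T : Int))).take n.toNat = canon (2 * (T : Int)) := by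
    rw [← hAlen, List.take_length]
  rw [← h1]
  rw [canon_take_eq n.toNat (le_of_eq hAlen.symm) hBlen]
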